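-- pv_equiv track=rewrite | github.com/ShouxinZhang/BrickMove1 | FinalJsonConvert/strip_comments.py | _adjust_blank_lines
-- ===== SOURCE A (Python) =====
-- def _adjust_blank_lines(text: str, remove: bool = False, compact: int | None = None) -> str:
--     """
--     Post-process blank lines.
--     - remove=True: drop lines that are entirely whitespace.
--     - compact=N: allow at most N consecutive blank lines (0 means none).
--     If both provided, remove takes precedence.
--     Preserves the trailing newline if the input had one.
--     """
--     had_trailing_newline = text.endswith("\n")
--     lines = text.splitlines()
--
--     out: list[str] = []
--     blank_run = 0
--
--     for line in lines:
--         is_blank = (line.strip() == "")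
--         if remove:
--             if is_blank:
--                 continue
--             out.append(line)
--             continue
--
--         if compact is not None:
--             if is_blank:
--                 if blank_run < max(0, compact):
--                     out.append("")
--                 blank_run += 1
--             else:
--                 blank_run = 0
--                 out.append(line)
--         else:
--             # no changes to blank lines
--             out.append(line)
--
--     result = "\n".join(out)
--     if had_trailing_newline:
--         result += "\n"
--     return result
-- ===== SOURCE B (Python) =====
-- from itertools import groupby
--
--
-- def _adjust_blank_lines(text: str, remove: bool = False, compact: int | None = None) -> str:
--     out: list[str] = []
--     for is_blank, group in groupby(text.splitlines(), key=lambda l: l.strip() == ""):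
--         run = list(group)
--         if not is_blank:
--             out.extend(run)
--         elif remove:
--             pass
--         elif compact is not None:
--             out.extend([""] * min(len(run), max(0, compact)))
--         else:
--             out.extend(run)
--     return "\n".join(out) + ("\n" if text.endswith("\n") else "")
-- ===== Notes on version B (the rewrite author's own statement) =====
-- stated objective: idiomatic
-- what changed: B groups the lines into maximal runs with itertools.groupby keyed on blankness and decides each run at once (emit all / nothing / min(len,max(0,compact)) empties), replacing A's per-line loop with a blank_run counter.
import Mathlib
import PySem

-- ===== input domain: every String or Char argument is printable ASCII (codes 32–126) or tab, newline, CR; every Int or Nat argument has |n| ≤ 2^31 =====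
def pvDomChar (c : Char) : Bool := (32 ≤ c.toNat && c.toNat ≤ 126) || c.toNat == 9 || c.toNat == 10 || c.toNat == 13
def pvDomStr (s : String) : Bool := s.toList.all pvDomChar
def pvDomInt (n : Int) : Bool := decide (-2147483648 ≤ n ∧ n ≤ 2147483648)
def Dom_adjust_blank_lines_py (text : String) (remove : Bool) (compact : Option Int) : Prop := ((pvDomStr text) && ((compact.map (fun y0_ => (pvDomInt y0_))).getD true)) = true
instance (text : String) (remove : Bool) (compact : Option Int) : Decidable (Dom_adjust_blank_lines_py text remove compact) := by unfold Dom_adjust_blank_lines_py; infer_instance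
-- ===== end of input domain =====

-- B replaces A's per-line loop with a blank_run counter by grouping the lines into maximal
-- blank/non-blank runs and deciding each run at once (objective: idiomatic, groupby-style).

-- ===== PORT A =====
-- line.strip() == "" (used by both Pythons)
def pvIsBlank (l : String) : Bool := PySem.Str.strip l == ""

-- A's loop body: state = (out, blank_run)
def pvStepA (remove : Bool) (compact : Option Int) (s : List String × Int) (line : String) :
    List String × Int :=
  let is_blank := pvIsBlank line
  if remove then
    if is_blank then s else (s.1 ++ [line], s.2)
  else
    match compact with
    | some c =>
      if is_blank then
        ((if s.2 < max 0 c then s.1 ++ [""] else s.1), s.2 + 1)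
      else (s.1 ++ [line], 0)
    | none => (s.1 ++ [line], s.2)

def adjust_blank_lines_py (text : String) (remove : Bool) (compact : Option Int) : String :=
  let had_trailing_newline := PySem.Str.endswith text "\n"
  let lines := PySem.Str.splitlines text
  let st := lines.foldl (pvStepA remove compact) ([], 0)
  let result := PySem.Str.join "\n" st.1
  if had_trailing_newline then result ++ "\n" else result

-- ===== PORT B =====
-- itertools.groupby(lines, key=lambda l: l.strip()==""): maximal runs tagged with blankness
def pvGroups : List String → List (Bool × List String)
  | [] => []
  | l :: ls =>
    (pvIsBlank l, l :: ls.takeWhile (fun x => pvIsBlank x == pvIsBlank l)) ::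
      pvGroups (ls.dropWhile (fun x => pvIsBlank x == pvIsBlank l))
termination_by ls => ls.length
decreasing_by
  simpa using Nat.lt_succ_of_le (List.length_dropWhile_le _ _)

-- B's per-group decision
def pvStepB (remove : Bool) (compact : Option Int) (acc : List String) (g : Bool × List String) :
    List String :=
  if !g.1 then acc ++ g.2
  else if remove then acc
  else
    match compact with
    | some n => acc ++ List.replicate (min ((g.2.length : Int)) (max 0 n)).toNat ""
    | none => acc ++ g.2

def adjust_blank_lines_py_alt (text : String) (remove : Bool) (compact : Option Int) : String :=
  let out := (pvGroups (PySem.Str.splitlines text)).foldl (pvStepB remove compact) []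
  PySem.Str.join "\n" out ++ (if PySem.Str.endswith text "\n" then "\n" else "")

-- ===== PRECONDITION & SPEC =====
def Spec_adjust_blank_lines_py (text : String) (remove : Bool) (compact : Option Int) (out : String) : Prop := out = adjust_blank_lines_py_alt text remove compact
instance (text : String) (remove : Bool) (compact : Option Int) (out : String) : Decidable (Spec_adjust_blank_lines_py text remove compact out) := by unfold Spec_adjust_blank_lines_py; infer_instance

-- ===== CLAIM (what is proved, stated in full; the proofs are below) =====
def Claim_equal_adjust_blank_lines_py : Prop := ∀ (text : String) (remove : Bool) (compact : Option Int), Dom_adjust_blank_lines_py text remove compact → Spec_adjust_blank_lines_py text remove compact (adjust_blank_lines_py text remove compact)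

-- ===== LEMMAS AND PROOFS =====

-- remove=True: A's loop appends exactly the non-blank lines
theorem pvA_remove (compact : Option Int) (lines : List String) (s : List String × Int) :
    lines.foldl (pvStepA true compact) s
      = (s.1 ++ lines.filter (fun l => !pvIsBlank l), s.2) := by
  induction lines generalizing s with
  | nil => simp
  | cons l ls ih =>
    simp only [List.foldl_cons, pvStepA, List.filter_cons]
    by_cases hb : pvIsBlank l
    · simp [hb, ih]
    · simp [hb, ih]

-- remove=True: B's group fold appends exactly the non-blank lines
theorem pvB_remove (compact : Option Int) (ls : List String) (acc : List String) :
    (pvGroups ls).foldl (pvStepB true compact) acc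
      = acc ++ ls.filter (fun l => !pvIsBlank l) := by
  induction ls using pvGroups.induct generalizing acc with
  | case1 => simp [pvGroups]
  | case2 l ls ih =>
    simp only [pvGroups]
    rw [List.foldl_cons, ih]
    have hsplit : (l :: ls.takeWhile (fun x => pvIsBlank x == pvIsBlank l)) ++
        ls.dropWhile (fun x => pvIsBlank x == pvIsBlank l) = l :: ls := by
      simp [List.takeWhile_append_dropWhile]
    have htake : ∀ x ∈ ls.takeWhile (fun x => pvIsBlank x == pvIsBlank l),
        pvIsBlank x = pvIsBlank l := by
      intro x hx
      simpa using List.mem_takeWhile_imp hx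
    have hrun : ∀ x ∈ l :: ls.takeWhile (fun x => pvIsBlank x == pvIsBlank l),
        pvIsBlank x = pvIsBlank l := by
      intro x hx
      rcases List.mem_cons.mp hx with h | h
      · rw [h]
      · exact htake x h
    conv_rhs => rw [← hsplit]
    rw [List.filter_append]
    rcases Bool.eq_false_or_eq_true (pvIsBlank l) with hb | hb
    · have hfil : (l :: ls.takeWhile (fun x => pvIsBlank x == pvIsBlank l)).filter
          (fun l => !pvIsBlank l) = [] := by
        rw [List.filter_eq_nil_iff]
        intro x hx
        rw [hrun x hx, hb]
        simp
      rw [hfil]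
      simp [pvStepB, hb]
    · have hfil : (l :: ls.takeWhile (fun x => pvIsBlank x == pvIsBlank l)).filter
          (fun l => !pvIsBlank l) = l :: ls.takeWhile (fun x => pvIsBlank x == pvIsBlank l) := by
        rw [List.filter_eq_self]
        intro x hx
        rw [hrun x hx, hb]
        simp
      rw [hfil]
      simp [pvStepB, hb]

-- remove=False, compact=None: every group is emitted unchanged
theorem pvStepB_none (acc : List String) (g : Bool × List String) :
    pvStepB false none acc g = acc ++ g.2 := by
  cases hb : g.1 <;> simp [pvStepB, hb]

-- remove=False, compact=None: A's loop appends every line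
theorem pvA_none (lines : List String) (s : List String × Int) :
    lines.foldl (pvStepA false none) s = (s.1 ++ lines, s.2) := by
  induction lines generalizing s with
  | nil => simp
  | cons l ls ih => simp [pvStepA, ih]

-- remove=False, compact=None: B's group fold appends every line
theorem pvB_none (ls : List String) (acc : List String) :
    (pvGroups ls).foldl (pvStepB false none) acc = acc ++ ls := by
  induction ls using pvGroups.induct generalizing acc with
  | case1 => simp [pvGroups]
  | case2 l ls ih =>
    simp only [pvGroups]
    rw [List.foldl_cons, pvStepB_none, ih]
    have hsplit : (l :: ls.takeWhile (fun x => pvIsBlank x == pvIsBlank l)) ++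
        ls.dropWhile (fun x => pvIsBlank x == pvIsBlank l) = l :: ls := by
      simp [List.takeWhile_append_dropWhile]
    conv_rhs => rw [← hsplit]
    simp

-- compact=some c: A over a run of blanks from blank_run = j appends min(len, max(0,c)-j) empties
theorem pvA_blank_run (c : Int) (run : List String) (hrun : ∀ x ∈ run, pvIsBlank x = true)
    (out : List String) (j : ℕ) :
    run.foldl (pvStepA false (some c)) (out, (j : Int))
      = (out ++ List.replicate (min run.length ((max 0 c).toNat - j)) "", (j : Int) + run.length) := by
  induction run generalizing out j with
  | nil => simp
  | cons x run ih =>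
    have hx : pvIsBlank x = true := hrun x (by simp)
    have hrun' : ∀ y ∈ run, pvIsBlank y = true := fun y hy => hrun y (by simp [hy])
    rw [List.foldl_cons]
    have hstep : pvStepA false (some c) (out, (j : Int)) x
        = ((if (j : Int) < max 0 c then out ++ [""] else out), ((j + 1 : ℕ) : Int)) := by
      simp [pvStepA, hx]
    rw [hstep]
    by_cases hj : (j : Int) < max 0 c
    · have hjn : j < (max 0 c).toNat := by omega
      rw [if_pos hj, ih hrun']
      have hrep : List.replicate (min (run.length + 1) ((max 0 c).toNat - j)) ""
          = "" :: List.replicate (min run.length ((max 0 c).toNat - (j + 1))) "" := by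
        rw [← List.replicate_succ]
        congr 1
        omega
      simp only [List.length_cons, hrep, Prod.mk.injEq]
      exact ⟨by simp, by push_cast; ring⟩
    · have hjn : ¬ j < (max 0 c).toNat := by omega
      rw [if_neg hj, ih hrun']
      have h1 : min (run.length + 1) ((max 0 c).toNat - j) = 0 := by omega
      have h2 : min run.length ((max 0 c).toNat - (j + 1)) = 0 := by omega
      simp only [List.length_cons, h1, h2, Prod.mk.injEq]
      exact ⟨by simp, by push_cast; ring⟩

-- compact=some c: A over non-blank lines from blank_run = 0 appends them all, blank_run stays 0
theorem pvA_nonblank_run (c : Int) (run : List String) (hrun : ∀ x ∈ run, pvIsBlank x = false)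
    (out : List String) :
    run.foldl (pvStepA false (some c)) (out, 0) = (out ++ run, 0) := by
  induction run generalizing out with
  | nil => simp
  | cons x run ih =>
    have hx : pvIsBlank x = false := hrun x (by simp)
    rw [List.foldl_cons]
    have hstep : pvStepA false (some c) (out, 0) x = (out ++ [x], 0) := by
      simp [pvStepA, hx]
    rw [hstep, ih (fun y hy => hrun y (by simp [hy]))]
    simp

-- compact=some c: a blank group's contribution in B
theorem pvStepB_some_blank (c : Int) (acc : List String) (g : Bool × List String)
    (hg : g.1 = true) :
    pvStepB false (some c) acc g
      = acc ++ List.replicate (min ((g.2.length : Int)) (max 0 c)).toNat "" := by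
  obtain ⟨a, gs⟩ := g
  cases hg
  simp [pvStepB]

-- compact=some c: the main group-splitting equivalence
theorem pvMain_some (c : Int) (ls : List String) (out : List String) (r : Int)
    (hr : ∀ l, ls.head? = some l → pvIsBlank l = true → r = 0) :
    (ls.foldl (pvStepA false (some c)) (out, r)).1
      = (pvGroups ls).foldl (pvStepB false (some c)) out := by
  induction ls using pvGroups.induct generalizing out r with
  | case1 => simp [pvGroups]
  | case2 l ls ih =>
    simp only [pvGroups]
    have hsplit : (l :: ls.takeWhile (fun x => pvIsBlank x == pvIsBlank l)) ++
        ls.dropWhile (fun x => pvIsBlank x == pvIsBlank l) = l :: ls := by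
      simp [List.takeWhile_append_dropWhile]
    have htake : ∀ x ∈ ls.takeWhile (fun x => pvIsBlank x == pvIsBlank l),
        pvIsBlank x = pvIsBlank l := by
      intro x hx
      simpa using List.mem_takeWhile_imp hx
    have hdropHead : ∀ l', (ls.dropWhile (fun x => pvIsBlank x == pvIsBlank l)).head? = some l' →
        (pvIsBlank l' == pvIsBlank l) = false := by
      intro l' hl'
      have hne : ls.dropWhile (fun x => pvIsBlank x == pvIsBlank l) ≠ [] := by
        intro h; rw [h] at hl'; simp at hl'
      have hprop := List.head_dropWhile_not (fun x => pvIsBlank x == pvIsBlank l) hne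
      rw [List.head?_eq_some_head hne, Option.some_inj] at hl'
      rw [← hl']
      exact hprop
    conv_lhs => rw [← hsplit, List.foldl_append]
    rw [List.foldl_cons]
    rcases Bool.eq_false_or_eq_true (pvIsBlank l) with hb | hb
    · -- blank group
      have hr0 : r = 0 := hr l rfl hb
      subst hr0
      have hall : ∀ x ∈ l :: ls.takeWhile (fun x => pvIsBlank x == pvIsBlank l),
          pvIsBlank x = true := by
        intro x hx
        rcases List.mem_cons.mp hx with h | h
        · rw [h]; exact hb
        · rw [htake x h, hb]
      have hblank := pvA_blank_run c _ hall out 0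
      push_cast at hblank
      rw [List.foldl_cons] at hblank
      rw [hblank]
      rw [ih _ _ (by
        intro l' hl' hbl'
        have hcontra := hdropHead l' hl'
        rw [hbl', hb] at hcontra
        simp at hcontra)]
      rw [List.foldl_cons]
      congr 1
      rw [pvStepB_some_blank c out _ hb]
      congr 2
      have hsnd : ((pvIsBlank l, l :: ls.takeWhile (fun x => pvIsBlank x == pvIsBlank l)) :
          Bool × List String).2 = l :: ls.takeWhile (fun x => pvIsBlank x == pvIsBlank l) := rfl
      rw [hsnd]
      omega
    · -- non-blank group
      have hstep1 : pvStepA false (some c) (out, r) l = (out ++ [l], 0) := by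
        simp [pvStepA, hb]
      have hall : ∀ x ∈ ls.takeWhile (fun x => pvIsBlank x == pvIsBlank l),
          pvIsBlank x = false := by
        intro x hx
        rw [htake x hx, hb]
      have h1 : List.foldl (pvStepA false (some c)) (out, r)
          (l :: ls.takeWhile (fun x => pvIsBlank x == pvIsBlank l)) = (out ++ [l] ++
          ls.takeWhile (fun x => pvIsBlank x == pvIsBlank l), 0) := by
        rw [List.foldl_cons, hstep1, pvA_nonblank_run c _ hall]
      rw [List.foldl_cons] at h1 ⊢
      rw [hstep1] at h1
      rw [hstep1, pvA_nonblank_run c _ hall]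
      rw [ih _ _ (fun _ _ _ => rfl)]
      congr 1
      simp [pvStepB, hb]

-- the output lists of the two ports agree in every mode
theorem pvOut_eq (remove : Bool) (compact : Option Int) (lines : List String) :
    (lines.foldl (pvStepA remove compact) ([], 0)).1
      = (pvGroups lines).foldl (pvStepB remove compact) [] := by
  cases remove with
  | true => rw [pvA_remove, pvB_remove]
  | false =>
    cases compact with
    | none => rw [pvA_none, pvB_none]
    | some c => exact pvMain_some c lines [] 0 (fun _ _ _ => rfl)

-- ===== VERDICT (by name: the statement is the Claim_ definition above) =====
theorem adjust_blank_lines_py_spec : Claim_equal_adjust_blank_lines_py := by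
  intro text remove compact _
  unfold Spec_adjust_blank_lines_py adjust_blank_lines_py adjust_blank_lines_py_alt
  simp only []
  rw [pvOut_eq]
  cases hE : PySem.Str.endswith text "\n" <;> simp
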